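-- pv_equiv track=rewrite | github.com/runninginair/leetcode | 2527. Find Xor-Beauty of Array.py | xorBeauty
-- ===== SOURCE A (Python) =====
-- from typing import List
--
-- def xorBeauty(nums: List[int]) -> int:
--     ans = 0
--     n = len(nums)
--     for i in range(n):
--         for j in range(n):
--             for k in range(n):
--                 ans ^= ((nums[i] | nums[j]) & nums[k])
--     return ans
-- ===== SOURCE B (Python) =====
-- from typing import List
--
-- def xorBeauty(nums: List[int]) -> int:
--     # Per bit, ((nums[i]|nums[j])&nums[k]) is set for (n^2-(n-m)^2)*m triples,
--     # where m counts elements with that bit set; this is odd iff m is odd,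
--     # so the xor-beauty equals the XOR of all elements.
--     ans = 0
--     for x in nums:
--         ans ^= x
--     return ans
-- ===== Notes on version B (the rewrite author's own statement) =====
-- stated objective: faster
-- what changed: Replaces the triple nested loop over all index triples by a single pass XOR of the elements, justified by a per-bit parity argument.
import Mathlib
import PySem

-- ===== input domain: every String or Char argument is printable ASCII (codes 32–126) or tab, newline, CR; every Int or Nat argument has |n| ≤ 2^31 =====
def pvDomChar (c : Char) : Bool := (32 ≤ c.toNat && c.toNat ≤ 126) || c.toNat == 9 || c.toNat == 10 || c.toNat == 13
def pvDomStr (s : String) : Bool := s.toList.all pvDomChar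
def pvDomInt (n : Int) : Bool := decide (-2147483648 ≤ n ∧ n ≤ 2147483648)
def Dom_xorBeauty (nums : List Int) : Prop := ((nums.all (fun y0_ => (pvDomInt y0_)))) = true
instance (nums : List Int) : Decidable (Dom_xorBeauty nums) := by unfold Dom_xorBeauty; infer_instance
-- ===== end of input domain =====

-- B replaces A's triple nested loop by a single XOR pass over the elements (per-bit parity argument).

-- ===== PORT A =====
def xorBeauty (nums : List Int) : Int :=
  (PySem.List.pyRange 0 (PySem.List.len nums) 1).foldl (fun ans i =>
    (PySem.List.pyRange 0 (PySem.List.len nums) 1).foldl (fun ans j =>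
      (PySem.List.pyRange 0 (PySem.List.len nums) 1).foldl (fun ans k =>
        PySem.Int.bxor ans (PySem.Int.band (PySem.Int.bor (PySem.List.pyGetD nums i 0) (PySem.List.pyGetD nums j 0)) (PySem.List.pyGetD nums k 0))) ans) ans) 0

-- ===== PORT B =====
def xorBeauty_alt (nums : List Int) : Int :=
  nums.foldl (fun ans x => PySem.Int.bxor ans x) 0

-- ===== PRECONDITION & SPEC =====
def Spec_xorBeauty (nums : List Int) (out : Int) : Prop := out = xorBeauty_alt nums
instance (nums : List Int) (out : Int) : Decidable (Spec_xorBeauty nums out) := by unfold Spec_xorBeauty; infer_instance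

-- ===== CLAIM (what is proved, stated in full; the proofs are below) =====
def Claim_equal_xorBeauty : Prop := ∀ (nums : List Int), Dom_xorBeauty nums → Spec_xorBeauty nums (xorBeauty nums)

-- ===== LEMMAS AND PROOFS =====

-- Nat: m - (m &&& n) = m.ldiff n (bridges PySem's subtraction formulas to Int.land)
theorem pvSubAnd : ∀ (m n : Nat), m - (m &&& n) = Nat.ldiff m n := by
  intro m
  induction m using Nat.binaryRec with
  | zero => intro n; simp [Nat.zero_and, Nat.ldiff, Nat.bitwise_zero_left]
  | bit b m ih =>
    intro n
    rw [← Nat.bit_testBit_zero_shiftRight_one n, Nat.land_bit, Nat.ldiff_bit, ← ih (n >>> 1)]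
    have h1 : m &&& (n >>> 1) ≤ m := Nat.and_le_left
    rw [Nat.bit_val, Nat.bit_val, Nat.bit_val]
    cases b <;> cases hn : n.testBit 0 <;>
      simp only [Bool.not_true, Bool.not_false,
        Bool.and_true, Bool.and_false, Bool.toNat_true, Bool.toNat_false] <;> omega

theorem pvIntExt (a b : Int) (h : ∀ k, a.testBit k = b.testBit k) : a = b := by
  cases a with
  | ofNat m =>
    cases b with
    | ofNat n =>
      have : m = n := Nat.eq_of_testBit_eq fun i => by have := h i; simpa [Int.testBit] using this
      simp [this]
    | negSucc n =>
      exfalso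
      have := h (m + n)
      have hm : m.testBit (m + n) = false := Nat.testBit_eq_false_of_lt
        (lt_of_lt_of_le Nat.lt_two_pow_self (Nat.pow_le_pow_right (by norm_num) (Nat.le_add_right _ _)))
      have hn : n.testBit (m + n) = false := Nat.testBit_eq_false_of_lt
        (lt_of_lt_of_le Nat.lt_two_pow_self (Nat.pow_le_pow_right (by norm_num) (Nat.le_add_left _ _)))
      simp [Int.testBit, hm, hn] at this
  | negSucc m =>
    cases b with
    | ofNat n =>
      exfalso
      have := h (m + n)
      have hm : m.testBit (m + n) = false := Nat.testBit_eq_false_of_lt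
        (lt_of_lt_of_le Nat.lt_two_pow_self (Nat.pow_le_pow_right (by norm_num) (Nat.le_add_right _ _)))
      have hn : n.testBit (m + n) = false := Nat.testBit_eq_false_of_lt
        (lt_of_lt_of_le Nat.lt_two_pow_self (Nat.pow_le_pow_right (by norm_num) (Nat.le_add_left _ _)))
      simp [Int.testBit, hm, hn] at this
    | negSucc n =>
      have : m = n := Nat.eq_of_testBit_eq fun i => by
        have := h i; simpa [Int.testBit] using this
      simp [this]

theorem pvBxorEq (a b : Int) : PySem.Int.bxor a b = Int.xor a b := by
  cases a with
  | ofNat m =>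
    cases b with
    | ofNat n => simp [PySem.Int.bxor, Int.xor, Int.ofNat_eq_natCast]
    | negSucc n =>
      show PySem.Int.bxor (Int.ofNat m) (Int.negSucc n) = Int.negSucc (m ^^^ n)
      unfold PySem.Int.bxor
      rw [if_pos (by rw [Int.ofNat_eq_natCast]; positivity),
          if_neg (not_le.mpr (Int.negSucc_lt_zero n))]
      have h1 : (-Int.negSucc n - 1) = (n : Int) := by rw [Int.negSucc_eq]; ring
      rw [h1, Int.negSucc_eq, Int.ofNat_eq_natCast]
      simp
      ring
  | negSucc m =>
    cases b with
    | ofNat n =>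
      show PySem.Int.bxor (Int.negSucc m) (Int.ofNat n) = Int.negSucc (m ^^^ n)
      unfold PySem.Int.bxor
      rw [if_neg (not_le.mpr (Int.negSucc_lt_zero m)),
          if_pos (by rw [Int.ofNat_eq_natCast]; positivity)]
      have h1 : (-Int.negSucc m - 1) = (m : Int) := by rw [Int.negSucc_eq]; ring
      rw [h1, Int.negSucc_eq, Int.ofNat_eq_natCast]
      simp
      ring
    | negSucc n =>
      show PySem.Int.bxor (Int.negSucc m) (Int.negSucc n) = ((m ^^^ n : Nat) : Int)
      unfold PySem.Int.bxor
      rw [if_neg (not_le.mpr (Int.negSucc_lt_zero m)),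
          if_neg (not_le.mpr (Int.negSucc_lt_zero n))]
      have h1 : (-Int.negSucc m - 1) = (m : Int) := by rw [Int.negSucc_eq]; ring
      have h2 : (-Int.negSucc n - 1) = (n : Int) := by rw [Int.negSucc_eq]; ring
      rw [h1, h2]
      simp

theorem pvBandEq (a b : Int) : PySem.Int.band a b = Int.land a b := by
  cases a with
  | ofNat m =>
    cases b with
    | ofNat n => simp [PySem.Int.band, Int.land, Int.ofNat_eq_natCast]
    | negSucc n =>
      show PySem.Int.band (Int.ofNat m) (Int.negSucc n) = ((Nat.ldiff m n : Nat) : Int)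
      unfold PySem.Int.band
      rw [if_pos (by rw [Int.ofNat_eq_natCast]; positivity),
          if_neg (not_le.mpr (Int.negSucc_lt_zero n))]
      have h1 : (-Int.negSucc n - 1) = (n : Int) := by rw [Int.negSucc_eq]; ring
      rw [h1]
      simp [pvSubAnd]
  | negSucc m =>
    cases b with
    | ofNat n =>
      show PySem.Int.band (Int.negSucc m) (Int.ofNat n) = ((Nat.ldiff n m : Nat) : Int)
      unfold PySem.Int.band
      rw [if_neg (not_le.mpr (Int.negSucc_lt_zero m)),
          if_pos (by rw [Int.ofNat_eq_natCast]; positivity)]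
      have h1 : (-Int.negSucc m - 1) = (m : Int) := by rw [Int.negSucc_eq]; ring
      rw [h1]
      simp [pvSubAnd]
    | negSucc n =>
      show PySem.Int.band (Int.negSucc m) (Int.negSucc n) = Int.negSucc (m ||| n)
      unfold PySem.Int.band
      rw [if_neg (not_le.mpr (Int.negSucc_lt_zero m)),
          if_neg (not_le.mpr (Int.negSucc_lt_zero n))]
      have h1 : (-Int.negSucc m - 1) = (m : Int) := by rw [Int.negSucc_eq]; ring
      have h2 : (-Int.negSucc n - 1) = (n : Int) := by rw [Int.negSucc_eq]; ring
      rw [h1, h2, Int.negSucc_eq]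
      simp
      ring

theorem pvBxorAssoc (a b c : Int) :
    PySem.Int.bxor (PySem.Int.bxor a b) c = PySem.Int.bxor a (PySem.Int.bxor b c) := by
  simp only [pvBxorEq]
  apply pvIntExt
  intro k
  simp only [Int.testBit_lxor]
  cases a.testBit k <;> cases b.testBit k <;> cases c.testBit k <;> rfl

theorem pvBxorLeftComm (a b c : Int) :
    PySem.Int.bxor a (PySem.Int.bxor b c) = PySem.Int.bxor b (PySem.Int.bxor a c) := by
  rw [← pvBxorAssoc, PySem.Int.bxor_comm a b, pvBxorAssoc]

theorem pvZeroBxor (a : Int) : PySem.Int.bxor 0 a = a := by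
  rw [PySem.Int.bxor_comm, PySem.Int.bxor_zero]

theorem pvBandDistrib (c x y : Int) :
    PySem.Int.band c (PySem.Int.bxor x y) = PySem.Int.bxor (PySem.Int.band c x) (PySem.Int.band c y) := by
  simp only [pvBxorEq, pvBandEq]
  apply pvIntExt
  intro k
  simp only [Int.testBit_lxor, Int.testBit_land]
  cases c.testBit k <;> cases x.testBit k <;> cases y.testBit k <;> rfl

theorem pvBorSelf (a : Int) : PySem.Int.bor a a = a := by
  unfold PySem.Int.bor
  split_ifs with h
  · simp [Nat.or_self, Int.toNat_of_nonneg h]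
  · simp [Nat.and_self]
    omega

-- XOR-fold machinery
def pvXorMap (f : Int → Int) (l : List Int) : Int :=
  l.foldl (fun s x => PySem.Int.bxor s (f x)) 0

theorem pvFoldShift (f : Int → Int) (l : List Int) :
    ∀ (x : Int), l.foldl (fun s z => PySem.Int.bxor s (f z)) x = PySem.Int.bxor x (pvXorMap f l) := by
  induction l with
  | nil =>
    intro x
    simp only [pvXorMap, List.foldl_nil]
    rw [PySem.Int.bxor_zero]
  | cons a t ih =>
    intro x
    rw [List.foldl_cons, ih]
    conv_rhs => unfold pvXorMap; rw [List.foldl_cons, ih]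
    rw [pvZeroBxor, pvBxorAssoc]

theorem pvXorMap_cons (f : Int → Int) (a : Int) (t : List Int) :
    pvXorMap f (a :: t) = PySem.Int.bxor (f a) (pvXorMap f t) := by
  simp only [pvXorMap, List.foldl_cons, pvZeroBxor]
  exact pvFoldShift f t (f a)

theorem pvXorMap_congr (f g : Int → Int) (l : List Int) (h : ∀ x ∈ l, f x = g x) :
    pvXorMap f l = pvXorMap g l := by
  induction l with
  | nil => rfl
  | cons a t ih =>
    rw [pvXorMap_cons, pvXorMap_cons, h a (by simp), ih (fun x hx => h x (by simp [hx]))]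

theorem pvXorMap_bxor (f g : Int → Int) (l : List Int) :
    pvXorMap (fun x => PySem.Int.bxor (f x) (g x)) l = PySem.Int.bxor (pvXorMap f l) (pvXorMap g l) := by
  induction l with
  | nil =>
    simp only [pvXorMap, List.foldl_nil]
    rw [PySem.Int.bxor_zero]
  | cons a t ih =>
    rw [pvXorMap_cons, pvXorMap_cons, pvXorMap_cons, ih]
    rw [pvBxorAssoc, pvBxorAssoc]
    congr 1
    rw [pvBxorLeftComm]

theorem pvXorMap_band_left (c : Int) (f : Int → Int) (l : List Int) :
    pvXorMap (fun x => PySem.Int.band c (f x)) l = PySem.Int.band c (pvXorMap f l) := by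
  induction l with
  | nil =>
    simp only [pvXorMap, List.foldl_nil]
    rw [PySem.Int.band_zero]
  | cons a t ih => rw [pvXorMap_cons, pvXorMap_cons, ih, pvBandDistrib]

theorem pvXorMap_band_right (c : Int) (f : Int → Int) (l : List Int) :
    pvXorMap (fun x => PySem.Int.band (f x) c) l = PySem.Int.band (pvXorMap f l) c := by
  rw [PySem.Int.band_comm _ c, ← pvXorMap_band_left]
  exact pvXorMap_congr _ _ _ (fun x _ => PySem.Int.band_comm _ _)

-- XOR over all ordered pairs of (x|y) collapses to the XOR of the list (off-diagonal pairs cancel)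
theorem pvDouble (l : List Int) :
    pvXorMap (fun x => pvXorMap (fun y => PySem.Int.bor x y) l) l = pvXorMap (fun x => x) l := by
  induction l with
  | nil => rfl
  | cons a t ih =>
    rw [pvXorMap_cons]
    have hF : ∀ x, pvXorMap (fun y => PySem.Int.bor x y) (a :: t)
        = PySem.Int.bxor (PySem.Int.bor x a) (pvXorMap (fun y => PySem.Int.bor x y) t) := by
      intro x; rw [pvXorMap_cons]
    simp only [hF]
    rw [pvXorMap_bxor]
    have hca : pvXorMap (fun x => PySem.Int.bor x a) t = pvXorMap (fun y => PySem.Int.bor a y) t :=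
      pvXorMap_congr _ _ _ (fun x _ => PySem.Int.bor_comm _ _)
    rw [hca, ih, pvBorSelf, pvXorMap_cons]
    rw [pvBxorAssoc, pvBxorLeftComm (pvXorMap (fun y => PySem.Int.bor a y) t)]
    rw [← pvBxorAssoc (pvXorMap (fun y => PySem.Int.bor a y) t), PySem.Int.bxor_self, pvZeroBxor]

-- collapsing the three index loops, innermost outwards
theorem pvLoop3 (nums : List Int) (x y ans : Int) :
    (PySem.List.pyRange 0 (nums.length : Int) 1).foldl
        (fun a k => PySem.Int.bxor a (PySem.Int.band (PySem.Int.bor x y) (PySem.List.pyGetD nums k 0))) ans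
      = PySem.Int.bxor ans (PySem.Int.band (PySem.Int.bor x y) (pvXorMap (fun u => u) nums)) := by
  rw [PySem.List.foldl_pyRange_zero_pyGetD' nums 0
      (fun a z => PySem.Int.bxor a (PySem.Int.band (PySem.Int.bor x y) z)) ans]
  rw [pvFoldShift (fun z => PySem.Int.band (PySem.Int.bor x y) z) nums ans]
  congr 1
  exact pvXorMap_band_left _ (fun u => u) nums

theorem pvLoop2 (nums : List Int) (x ans : Int) :
    (PySem.List.pyRange 0 (nums.length : Int) 1).foldl
        (fun a j => PySem.Int.bxor a (PySem.Int.band (PySem.Int.bor x (PySem.List.pyGetD nums j 0)) (pvXorMap (fun u => u) nums))) ans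
      = PySem.Int.bxor ans (PySem.Int.band (pvXorMap (fun y => PySem.Int.bor x y) nums) (pvXorMap (fun u => u) nums)) := by
  rw [PySem.List.foldl_pyRange_zero_pyGetD' nums 0
      (fun a v => PySem.Int.bxor a (PySem.Int.band (PySem.Int.bor x v) (pvXorMap (fun u => u) nums))) ans]
  rw [pvFoldShift (fun v => PySem.Int.band (PySem.Int.bor x v) (pvXorMap (fun u => u) nums)) nums ans]
  congr 1
  exact pvXorMap_band_right _ _ nums

-- ===== VERDICT (by name: the statement is the Claim_ definition above) =====
theorem xorBeauty_spec : Claim_equal_xorBeauty := by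
  intro nums _
  unfold Spec_xorBeauty xorBeauty
  simp only [PySem.List.len_eq]
  simp only [pvLoop3, pvLoop2]
  rw [PySem.List.foldl_pyRange_zero_pyGetD' nums 0
      (fun a v => PySem.Int.bxor a
        (PySem.Int.band (pvXorMap (fun y => PySem.Int.bor v y) nums) (pvXorMap (fun u => u) nums))) 0]
  rw [pvFoldShift (fun v => PySem.Int.band (pvXorMap (fun y => PySem.Int.bor v y) nums) (pvXorMap (fun u => u) nums)) nums 0]
  rw [pvZeroBxor, pvXorMap_band_right, pvDouble, PySem.Int.band_self]
  rfl
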